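-- pv_equiv track=rewrite | github.com/ianmnz/adventofcode | src/y2025/d03.py | joltage_output
-- ===== SOURCE A (Python) =====
-- from operator import itemgetter
--
-- def joltage_output(battery: str, depth: int) -> str:
--     if depth == 0:
--         return ""
--
--     n = len(battery)
--
--     if n <= depth:
--         return battery
--
--     view = battery[: n - (depth - 1)]
--     idx, char = max(enumerate(view), key=itemgetter(1))
--     return char + joltage_output(battery[idx + 1 :], depth - 1)
-- ===== SOURCE B (Python) =====
-- def joltage_output(battery: str, depth: int) -> str:
--     # Greedy monotonic-stack selection: keep `depth` chars, dropping
--     # len(battery) - depth chars, popping smaller stack tops while drops remain.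
--     drop = len(battery) - depth
--     if drop <= 0:
--         return battery
--
--     stack = []
--     for c in battery:
--         while stack and stack[-1] < c and drop > 0:
--             stack.pop()
--             drop -= 1
--         stack.append(c)
--     return "".join(stack[:depth])
-- ===== Notes on version B (the rewrite author's own statement) =====
-- stated objective: faster
-- what changed: Replaced A's recursive repeated windowed-argmax (find the first maximum of a shrinking prefix, recurse on the suffix) by a single left-to-right pass with a monotonic stack that pops smaller tops while drop budget remains.
import Mathlib
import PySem

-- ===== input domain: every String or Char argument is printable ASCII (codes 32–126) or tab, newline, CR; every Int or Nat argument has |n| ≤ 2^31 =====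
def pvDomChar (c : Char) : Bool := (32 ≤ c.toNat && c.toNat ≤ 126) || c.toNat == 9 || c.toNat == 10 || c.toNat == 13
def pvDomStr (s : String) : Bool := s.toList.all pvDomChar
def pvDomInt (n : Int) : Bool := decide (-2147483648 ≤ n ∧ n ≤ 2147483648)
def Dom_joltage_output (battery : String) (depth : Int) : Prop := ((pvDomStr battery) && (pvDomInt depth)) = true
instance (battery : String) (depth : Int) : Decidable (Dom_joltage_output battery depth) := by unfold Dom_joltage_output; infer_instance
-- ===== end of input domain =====

-- B replaces A's recursive repeated windowed-argmax by a one-pass monotonic-stack greedy selection (asymptotically faster).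

-- ===== PORT A =====
-- membership facts about `enumerate`, cited by the port's `decreasing_by`
theorem pv_enum_mem {α : Type} (l : List α) :
    ∀ (s : Int) (p : Int × α), p ∈ PySem.List.enumerate l s →
      s ≤ p.1 ∧ p.1 < s + l.length := by
  induction l with
  | nil => intro s p h; simp [PySem.List.enumerate] at h
  | cons x t ih =>
      intro s p h
      simp only [PySem.List.enumerate, List.mem_cons] at h
      rcases h with h | h
      · subst h
        simp only [List.length_cons]
        push_cast
        omega
      · have := ih (s + 1) p h
        simp only [List.length_cons]
        push_cast
        omega

-- A's port: literal transliteration of the Python over `battery.toList`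
def pvJA (s : List Char) (depth : Int) : List Char :=
  if depth = 0 then []
  else
    let n : Int := s.length
    if n ≤ depth then s
    else
      let view := PySem.List.slice s none (some (n - (depth - 1)))
      match h : PySem.List.max? (PySem.List.enumerate view 0) (fun p => p.2) with
      | none => []  -- Python raises ValueError here (empty view); excluded by Pre_
      | some (idx, ch) =>
          ch :: pvJA (PySem.List.slice s (some (idx + 1)) none) (depth - 1)
termination_by s.length
decreasing_by
  have hmem := PySem.List.max?_mem h
  have hidx := pv_enum_mem view 0 _ hmem
  have hvne : view ≠ [] := by
    intro hv
    rw [hv] at hmem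
    simp [PySem.List.enumerate] at hmem
  obtain ⟨x, hx⟩ := List.exists_mem_of_ne_nil view hvne
  have hxs : x ∈ s := PySem.List.mem_of_mem_slice s none (some (n - (depth - 1))) hx
  have hne : s ≠ [] := List.ne_nil_of_mem hxs
  have h0 : 0 ≤ idx := by simpa using hidx.1
  rw [PySem.List.slice_from s (show (0:Int) ≤ idx + 1 by omega)]
  have hlen : 0 < s.length := List.length_pos_iff.mpr hne
  have ht : 0 < (idx + 1).toNat := by omega
  simp only [List.length_drop]
  omega

def joltage_output (battery : String) (depth : Int) : String :=
  String.ofList (pvJA battery.toList depth)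

-- ===== PORT B =====
-- `while stack and stack[-1] < c and drop > 0: stack.pop(); drop -= 1`
-- (stack kept top-first; Python's bottom-first list is its reverse)
def pvPop (c : Char) : List Char → Int → List Char × Int
  | [], b => ([], b)
  | t :: st, b => if t < c ∧ 0 < b then pvPop c st (b - 1) else (t :: st, b)

-- one iteration of the `for c in battery` loop: pop, then `stack.append(c)`
def pvStep (p : List Char × Int) (c : Char) : List Char × Int :=
  let q := pvPop c p.1 p.2
  (c :: q.1, q.2)

def joltage_output_alt (battery : String) (depth : Int) : String :=
  let s := battery.toList
  let drop : Int := (s.length : Int) - depth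
  if drop ≤ 0 then battery
  else
    let st := (s.foldl pvStep ([], drop)).1
    String.ofList (PySem.List.slice st.reverse none (some depth))  -- ''.join(stack[:depth])

-- ===== PRECONDITION & SPEC =====
-- Pre_ excludes exactly depth < 0, on which A always raises ValueError (max() of an empty sequence).
def Pre_joltage_output (battery : String) (depth : Int) : Prop := 0 ≤ depth
instance (battery : String) (depth : Int) : Decidable (Pre_joltage_output battery depth) := by
  unfold Pre_joltage_output; infer_instance

def pvWitness_joltage_output : String × Int := ("zebra", 3)

def Spec_joltage_output (battery : String) (depth : Int) (out : String) : Prop :=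
  out = joltage_output_alt battery depth
instance (battery : String) (depth : Int) (out : String) : Decidable (Spec_joltage_output battery depth out) := by
  unfold Spec_joltage_output; infer_instance

-- ===== CLAIM (what is proved, stated in full; the proofs are below) =====
def Claim_equal_joltage_output : Prop :=
  ∀ (battery : String) (depth : Int), Dom_joltage_output battery depth →
    Pre_joltage_output battery depth →
    Spec_joltage_output battery depth (joltage_output battery depth)

-- ===== LEMMAS AND PROOFS =====
-- ===== P lemmas about pvPop =====
theorem pvPop_inv (c : Char) : ∀ (st : List Char) (b : Int),
    (pvPop c st b).1 <:+ st ∧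
    (pvPop c st b).2 + (st.length : Int) = b + ((pvPop c st b).1.length : Int) := by
  intro st
  induction st with
  | nil => intro b; simp [pvPop]
  | cons t st ih =>
      intro b
      by_cases h : t < c ∧ 0 < b
      · have := ih (b - 1)
        simp only [pvPop, if_pos h]
        refine ⟨(this.1).trans (List.suffix_cons t st), ?_⟩
        have := this.2
        simp only [List.length_cons]
        push_cast at this ⊢
        omega
      · simp [pvPop, if_neg h]

theorem pvPop_zero (c : Char) (st : List Char) (b : Int) (hb : b ≤ 0) :
    pvPop c st b = (st, b) := by
  cases st with
  | nil => simp [pvPop]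
  | cons t st => simp only [pvPop]; rw [if_neg]; omega

theorem pvPop_all (c : Char) : ∀ (st : List Char) (b : Int),
    (∀ x ∈ st, x < c) → (st.length : Int) ≤ b →
    pvPop c st b = ([], b - st.length) := by
  intro st
  induction st with
  | nil => intro b _ _; simp [pvPop]
  | cons t st ih =>
      intro b hlt hle
      simp only [List.length_cons] at hle
      have hb : 0 < b := by push_cast at hle; omega
      have hc : t < c ∧ 0 < b := ⟨hlt t (by simp), hb⟩
      simp only [pvPop, if_pos hc]
      rw [ih (b - 1) (fun x hx => hlt x (List.mem_cons_of_mem t hx)) (by push_cast at hle ⊢; omega)]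
      simp only [List.length_cons]
      congr 1
      push_cast
      ring

theorem pvPop_bottom (c m : Char) : ∀ (st : List Char) (b : Int),
    ((st.length : Int) < b → ¬ m < c) →
    pvPop c (st ++ [m]) b = ((pvPop c st b).1 ++ [m], (pvPop c st b).2) := by
  intro st
  induction st with
  | nil =>
      intro b hcond
      have hneg : ¬ (m < c ∧ 0 < b) := by
        by_cases hb : 0 < b
        · exact fun hcontra => hcond (by simpa using hb) hcontra.1
        · exact fun hcontra => hb hcontra.2
      simp only [List.nil_append, pvPop, if_neg hneg]
  | cons t st ih =>
      intro b hcond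
      by_cases h : t < c ∧ 0 < b
      · simp only [List.cons_append, pvPop, if_pos h]
        exact ih (b - 1) (fun hlen => hcond (by simp only [List.length_cons]; push_cast at hlen ⊢; omega))
      · simp only [List.cons_append, pvPop, if_neg h]

-- ===== F lemmas about the fold =====
theorem pvFold_inv : ∀ (u : List Char) (st : List Char) (b : Int),
    ((u.foldl pvStep (st, b)).2 + ((st.length : Int) + (u.length : Int))
        = b + ((u.foldl pvStep (st, b)).1.length : Int)) ∧
    (∀ x ∈ (u.foldl pvStep (st, b)).1, x ∈ st ∨ x ∈ u) := by
  intro u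
  induction u with
  | nil => intro st b; simp
  | cons c u ih =>
      intro st b
      have hpop := pvPop_inv c st b
      have hstep : pvStep (st, b) c = (c :: (pvPop c st b).1, (pvPop c st b).2) := rfl
      simp only [List.foldl_cons, hstep]
      obtain ⟨ihlen, ihmem⟩ := ih (c :: (pvPop c st b).1) (pvPop c st b).2
      constructor
      · have := hpop.2
        simp only [List.length_cons] at ihlen ⊢
        push_cast at ihlen this ⊢
        omega
      · intro x hx
        rcases ihmem x hx with hmem | hmem
        · rcases List.mem_cons.mp hmem with h | h
          · right; simp [h]
          · left; exact hpop.1.subset h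
        · right; exact List.mem_cons_of_mem c hmem

theorem pvFold_zero : ∀ (u : List Char) (st : List Char) (b : Int), b ≤ 0 →
    u.foldl pvStep (st, b) = (u.reverse ++ st, b) := by
  intro u
  induction u with
  | nil => intro st b _; simp
  | cons c u ih =>
      intro st b hb
      have hstep : pvStep (st, b) c = (c :: (pvPop c st b).1, (pvPop c st b).2) := rfl
      simp only [List.foldl_cons, hstep, pvPop_zero c st b hb]
      rw [ih (c :: st) b hb]
      simp

theorem pvFold_bottom (m : Char) : ∀ (u : List Char) (st : List Char) (b : Int),
    (∀ t (ht : t < u.length), ((st.length : Int) + t < b → u[t] ≤ m)) →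
    u.foldl pvStep (st ++ [m], b)
      = ((u.foldl pvStep (st, b)).1 ++ [m], (u.foldl pvStep (st, b)).2) := by
  intro u
  induction u with
  | nil => intro st b _; simp
  | cons c u ih =>
      intro st b hcond
      have h0 : (st.length : Int) < b → ¬ m < c := by
        intro hlt
        have := hcond 0 (by simp) (by simpa using hlt)
        simpa using this
      have hpop := pvPop_inv c st b
      have hstepm : pvStep (st ++ [m], b) c
          = ((c :: (pvPop c st b).1) ++ [m], (pvPop c st b).2) := by
        show (c :: (pvPop c (st ++ [m]) b).1, (pvPop c (st ++ [m]) b).2) = _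
        rw [pvPop_bottom c m st b h0]
        rfl
      have hstep : pvStep (st, b) c = (c :: (pvPop c st b).1, (pvPop c st b).2) := rfl
      simp only [List.foldl_cons, hstepm, hstep]
      apply ih (c :: (pvPop c st b).1) (pvPop c st b).2
      intro t ht hlt
      have hb2 := hpop.2
      have hlen : ((pvPop c st b).1.length : Int) ≤ (st.length : Int) := by
        exact_mod_cast Int.ofNat_le.mpr (List.IsSuffix.length_le hpop.1)
      have := hcond (t + 1) (by simpa using Nat.succ_lt_succ ht)
        (by simp only [List.length_cons] at hlt ⊢; push_cast at hlt ⊢; omega)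
      simpa using this

theorem pvFold_split (pre suf : List Char) (m : Char) (b : Int)
    (hlt : ∀ x ∈ pre, x < m) (hle : (pre.length : Int) ≤ b) :
    (pre ++ m :: suf).foldl pvStep ([], b)
      = suf.foldl pvStep ([m], b - pre.length) := by
  rw [List.foldl_append]
  obtain ⟨hlen, hmem⟩ := pvFold_inv pre [] b
  set q := pre.foldl pvStep ([], b) with hq
  have hsub : ∀ x ∈ q.1, x < m := by
    intro x hx
    rcases hmem x hx with h | h
    · simp at h
    · exact hlt x h
  have hql : (q.1.length : Int) ≤ q.2 := by
    simp at hlen; omega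
  have : List.foldl pvStep q (m :: suf) = List.foldl pvStep (pvStep q m) suf := rfl
  rw [show (m :: suf) = [m] ++ suf from rfl, List.foldl_append]
  have hstep : pvStep q m = ([m], b - pre.length) := by
    have hpop := pvPop_all m q.1 q.2 hsub hql
    show (m :: (pvPop m q.1 q.2).1, (pvPop m q.1 q.2).2) = _
    rw [hpop]
    have h2 : q.2 - (q.1.length : Int) = b - pre.length := by
      simp at hlen; omega
    rw [h2]
  simp [hstep]

-- ===== E lemmas: Python max(enumerate(view), key=itemgetter(1)) picks the first maximum =====
theorem pvEnum_cons {α : Type} (x : α) (t : List α) (s : Int) :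
    PySem.List.enumerate (x :: t) s = (s, x) :: PySem.List.enumerate t (s + 1) := by
  simp [PySem.List.enumerate]

-- the fold inside PySem.List.max? with key = itemgetter(1), named
def pvMaxStep (acc : Option (Int × Char)) (x : Int × Char) : Option (Int × Char) :=
  match acc with
  | none => some x
  | some m => if m.2 < x.2 then some x else some m

theorem pvMax?_eq (l : List (Int × Char)) :
    PySem.List.max? l (fun p => p.2) = List.foldl pvMaxStep none l := by
  unfold PySem.List.max? pvMaxStep
  congr 1
  funext acc x
  cases acc <;> rfl

theorem pvFoldMax : ∀ (l : List Char) (s j0 : Int) (c0 : Char),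
    ∃ r, List.foldl pvMaxStep (some (j0, c0)) (PySem.List.enumerate l s) = some r ∧
      ((r = (j0, c0) ∧ ∀ t (ht : t < l.length), l[t] ≤ c0) ∨
       (∃ (i : Nat) (hi : i < l.length), r = (s + i, l[i]'hi) ∧ c0 < l[i]'hi ∧
         (∀ t (ht : t < i), l[t]'(by omega) < l[i]'hi) ∧
         (∀ t (ht : t < l.length), l[t] ≤ l[i]'hi))) := by
  intro l
  induction l with
  | nil => intro s j0 c0; exact ⟨(j0, c0), by simp [PySem.List.enumerate]⟩
  | cons x t ih =>
      intro s j0 c0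
      rw [pvEnum_cons, List.foldl_cons]
      show ∃ r, List.foldl pvMaxStep (if c0 < x then some (s, x) else some (j0, c0)) _ = some r ∧ _
      by_cases hx : c0 < x
      · simp only [if_pos hx]
        obtain ⟨r, hr, hcase⟩ := ih (s + 1) s x
        refine ⟨r, hr, Or.inr ?_⟩
        rcases hcase with ⟨hre, hall⟩ | ⟨i, hi, hre, hlt, hbef, hall⟩
        · refine ⟨0, by simp, by simpa using hre, by simpa using hx, by omega, ?_⟩
          intro u hu
          cases u with
          | zero => simp
          | succ u =>
              simp only [List.getElem_cons_succ]
              exact hall u (by simpa using hu)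
        · refine ⟨i + 1, by simpa using hi, ?_, ?_, ?_, ?_⟩
          · rw [hre]; simp only [List.getElem_cons_succ]; congr 1; push_cast; ring
          · simpa using hx.trans hlt
          · intro u hu
            cases u with
            | zero => simpa using hlt
            | succ u => simpa using hbef u (by omega)
          · intro u hu
            cases u with
            | zero => simpa using hlt.le
            | succ u => simpa using hall u (by simpa using hu)
      · simp only [if_neg hx]
        obtain ⟨r, hr, hcase⟩ := ih (s + 1) j0 c0
        refine ⟨r, hr, ?_⟩
        rcases hcase with ⟨hre, hall⟩ | ⟨i, hi, hre, hlt, hbef, hall⟩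
        · refine Or.inl ⟨hre, ?_⟩
          intro u hu
          cases u with
          | zero => simpa using le_of_not_gt hx
          | succ u => simpa using hall u (by simpa using hu)
        · refine Or.inr ⟨i + 1, by simpa using hi, ?_, ?_, ?_, ?_⟩
          · rw [hre]; simp only [List.getElem_cons_succ]; congr 1; push_cast; ring
          · simpa using hlt
          · intro u hu
            cases u with
            | zero => simpa using (le_of_not_gt hx).trans_lt hlt
            | succ u => simpa using hbef u (by omega)
          · intro u hu
            cases u with
            | zero => simpa using ((le_of_not_gt hx).trans hlt.le)
            | succ u => simpa using hall u (by simpa using hu)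

theorem pvMaxEnum_spec (view : List Char) (hv : view ≠ []) :
    ∃ (i : Nat) (hi : i < view.length),
      PySem.List.max? (PySem.List.enumerate view 0) (fun p => p.2)
        = some ((i : Int), view[i]'hi) ∧
      (∀ j (hj : j < i), view[j]'(by omega) < view[i]'hi) ∧
      (∀ j (hj : j < view.length), view[j] ≤ view[i]'hi) := by
  cases view with
  | nil => exact absurd rfl hv
  | cons x t =>
      have hmax : PySem.List.max? (PySem.List.enumerate (x :: t) 0) (fun p => p.2)
          = List.foldl pvMaxStep (some ((0 : Int), x)) (PySem.List.enumerate t 1) := by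
        rw [pvEnum_cons, pvMax?_eq]
        norm_num [pvMaxStep]
      obtain ⟨r, hr, hcase⟩ := pvFoldMax t 1 0 x
      rcases hcase with ⟨hre, hall⟩ | ⟨i, hi, hre, hlt, hbef, hall⟩
      · refine ⟨0, by simp, ?_, by omega, ?_⟩
        · rw [hmax, hr, hre]; simp
        · intro j hj
          cases j with
          | zero => simp
          | succ j => simpa using hall j (by simpa using hj)
      · refine ⟨i + 1, by simpa using hi, ?_, ?_, ?_⟩
        · rw [hmax, hr, hre]
          simp only [List.getElem_cons_succ]
          congr 2
          push_cast
          ring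
        · intro j hj
          cases j with
          | zero => simpa using hlt
          | succ j => simpa using hbef j (by omega)
        · intro j hj
          cases j with
          | zero => simpa using hlt.le
          | succ j => simpa using hall j (by simpa using hj)

-- ===== main equivalence at the List Char level =====
def pvAltL (s : List Char) (K : Nat) : List Char :=
  if ((s.length : Int) - K) ≤ 0 then s
  else PySem.List.slice ((s.foldl pvStep ([], (s.length : Int) - K)).1.reverse) none (some (K : Int))

theorem pvMain : ∀ (K : Nat) (s : List Char), pvJA s (K : Int) = pvAltL s K := by
  intro K
  induction K with
  | zero =>
      intro s
      rw [pvJA, pvAltL]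
      simp only [Nat.cast_zero, Int.sub_zero]
      simp only [if_true]
      by_cases hs : (s.length : Int) ≤ 0
      · rw [if_pos hs]
        have h0 : s.length = 0 := by omega
        exact (List.length_eq_zero_iff.mp h0).symm
      · rw [if_neg hs, PySem.List.slice_to _ (le_refl (0 : Int))]
        simp
  | succ K ih =>
      intro s
      have hk0 : ((K + 1 : Nat) : Int) ≠ 0 := by push_cast; omega
      by_cases hnk : (s.length : Int) ≤ ((K + 1 : Nat) : Int)
      · rw [pvJA, pvAltL, if_neg hk0, if_pos hnk, if_pos (by omega)]
      · -- main case: len > K+1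
        have hlen2 : K + 1 < s.length := by omega
        have hWle : s.length - K ≤ s.length := by omega
        have hview : PySem.List.slice s none (some ((s.length : Int) - (((K + 1 : Nat) : Int) - 1)))
            = s.take (s.length - K) := by
          have h1 : (s.length : Int) - (((K + 1 : Nat) : Int) - 1) = ((s.length - K : Nat) : Int) := by
            push_cast; omega
          rw [h1, PySem.List.slice_to _ (by omega : (0:Int) ≤ ((s.length - K : Nat) : Int))]
          simp
        have hvlen : (s.take (s.length - K)).length = s.length - K := by simp
        have hvne : s.take (s.length - K) ≠ [] := by
          intro h
          have := congrArg List.length h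
          rw [hvlen] at this
          simp at this
          omega
        obtain ⟨i, hiW', hmax, hbef, hall⟩ := pvMaxEnum_spec (s.take (s.length - K)) hvne
        have hiW : i < s.length - K := by rwa [hvlen] at hiW'
        have hi_len : i < s.length := by omega
        have hm_eq : (s.take (s.length - K))[i]'hiW' = s[i]'hi_len := by simp
        rw [pvJA]
        simp only [if_neg hk0, if_neg hnk]
        split
        · -- max? = none: contradicts hmax
          next heq =>
            rw [hview, hmax] at heq
            simp at heq
        · next idx ch heq =>
            rw [hview, hmax] at heq
            injection heq with h2
            injection h2 with hidx hch
            subst hidx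
            subst hch
            rw [hm_eq]
            rw [PySem.List.slice_from s (by omega : (0:Int) ≤ (i:Int) + 1)]
            have htn : ((i : Int) + 1).toNat = i + 1 := by omega
            rw [htn]
            have hk1 : ((K + 1 : Nat) : Int) - 1 = (K : Int) := by push_cast; omega
            rw [hk1]
            -- RHS: unfold B and split the fold
            conv_rhs => rw [pvAltL]
            rw [if_neg (by omega : ¬ ((s.length : Int) - ((K + 1 : Nat) : Int) ≤ 0))]
            have hiI : (i : Int) ≤ (s.length : Int) - ((K + 1 : Nat) : Int) := by push_cast; omega
            have hsplit : s = s.take i ++ s[i]'hi_len :: s.drop (i + 1) := by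
              conv_lhs => rw [← List.take_append_drop i s]
              rw [List.getElem_cons_drop]
            have hprelen : (s.take i).length = i := by simp; omega
            have hfold1 : s.foldl pvStep ([], (s.length : Int) - ((K + 1 : Nat) : Int))
                = (s.drop (i + 1)).foldl pvStep
                    ([s[i]'hi_len], (s.length : Int) - ((K + 1 : Nat) : Int) - i) := by
              have hfold0 : List.foldl pvStep ([], (s.length : Int) - ((K + 1 : Nat) : Int))
                  (s.take i ++ s[i]'hi_len :: s.drop (i + 1))
                  = List.foldl pvStep ([], (s.length : Int) - ((K + 1 : Nat) : Int)) s := by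
                rw [← hsplit]
              rw [← hfold0]
              rw [pvFold_split (s.take i) (s.drop (i + 1)) (s[i]'hi_len)
                    ((s.length : Int) - ((K + 1 : Nat) : Int)) ?_ ?_]
              · rw [hprelen]
              · intro x hx
                obtain ⟨j, hj, hjx⟩ := List.mem_iff_getElem.mp hx
                rw [hprelen] at hj
                rw [List.getElem_take] at hjx
                rw [← hjx, ← hm_eq]
                have := hbef j hj
                simpa using this
              · rw [hprelen]; exact hiI
            have hcond : ∀ t (ht : t < (s.drop (i + 1)).length),
                (((([] : List Char).length : Int) + t)
                    < (s.length : Int) - ((K + 1 : Nat) : Int) - i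
                  → (s.drop (i + 1))[t] ≤ s[i]'hi_len) := by
              intro t ht hlt
              simp only [List.length_nil, Nat.cast_zero, zero_add] at hlt
              have htW : i + 1 + t < s.length - K := by
                push_cast at hlt
                omega
              rw [List.getElem_drop]
              have := hall (i + 1 + t) (by rw [hvlen]; exact htW)
              rw [hm_eq] at this
              simpa using this
            have hfold2 : (s.drop (i + 1)).foldl pvStep
                  ([s[i]'hi_len], (s.length : Int) - ((K + 1 : Nat) : Int) - i)
                = (((s.drop (i + 1)).foldl pvStep
                      ([], (s.length : Int) - ((K + 1 : Nat) : Int) - i)).1 ++ [s[i]'hi_len],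
                   ((s.drop (i + 1)).foldl pvStep
                      ([], (s.length : Int) - ((K + 1 : Nat) : Int) - i)).2) := by
              have := pvFold_bottom (s[i]'hi_len) (s.drop (i + 1)) []
                ((s.length : Int) - ((K + 1 : Nat) : Int) - i) hcond
              simpa using this
            rw [hfold1, hfold2]
            simp only [List.reverse_append, List.reverse_cons, List.reverse_nil, List.nil_append,
              List.singleton_append]
            rw [PySem.List.slice_to _ (by omega : (0:Int) ≤ ((K + 1 : Nat) : Int))]
            have htn2 : (((K + 1 : Nat) : Int)).toNat = K + 1 := by omega
            rw [htn2, List.take_succ_cons]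
            congr 1
            -- remaining: pvJA (s.drop (i+1)) K = take K (reverse of inner fold stack)
            rw [ih (s.drop (i + 1)), pvAltL]
            have hsl : ((s.drop (i + 1)).length : Int) = (s.length : Int) - (i : Int) - 1 := by
              simp; push_cast; omega
            by_cases hz : ((s.drop (i + 1)).length : Int) - (K : Int) ≤ 0
            · have hz0 : (s.length : Int) - ((K + 1 : Nat) : Int) - (i : Int) = 0 := by
                rw [hsl] at hz
                push_cast at hz hiI ⊢
                omega
              rw [if_pos hz, hz0, pvFold_zero (s.drop (i + 1)) [] 0 (le_refl 0)]
              simp only [List.append_nil, List.reverse_reverse]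
              have hlenK : (s.drop (i + 1)).length = K := by
                push_cast at hz0
                simp
                omega
              rw [← hlenK, List.take_length]
            · rw [if_neg hz]
              have hbud : ((s.drop (i + 1)).length : Int) - (K : Int)
                  = (s.length : Int) - ((K + 1 : Nat) : Int) - (i : Int) := by
                rw [hsl]; push_cast; omega
              rw [hbud, PySem.List.slice_to _ (by omega : (0:Int) ≤ ((K : Nat) : Int))]
              simp


-- ===== VERDICT =====
theorem joltage_output_spec : Claim_equal_joltage_output := by
  unfold Claim_equal_joltage_output Spec_joltage_output Pre_joltage_output
  intro battery depth _ hpre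
  have hd : ((depth.toNat : Nat) : Int) = depth := Int.toNat_of_nonneg hpre
  have hmain := pvMain depth.toNat battery.toList
  rw [hd] at hmain
  show String.ofList (pvJA battery.toList depth) = joltage_output_alt battery depth
  rw [hmain]
  have halt : joltage_output_alt battery depth
      = if ((battery.toList.length : Int) - depth) ≤ 0 then battery
        else String.ofList (PySem.List.slice
          ((battery.toList.foldl pvStep ([], (battery.toList.length : Int) - depth)).1.reverse)
          none (some depth)) := rfl
  rw [halt, pvAltL, hd]
  split_ifs with h
  · exact String.ofList_toList
  · rfl
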